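-- pv_equiv track=rewrite | github.com/tmdgh1592/PROBLEM_SOLVE | Corp/NAVER/1.py | solution
-- ===== SOURCE A (Python) =====
-- def solution(arr):
--     on_off_dict = dict()
--     count = 0
--
--     for i in range(len(arr)):
--         on_off_dict[i] = False
--
--     for num in arr:
--         on_off_dict[num-1] = True
--         flag = True
--
--         for i in range(num-1):
--             if on_off_dict[i] == False:
--                 flag = False
--                 break
--
--         if flag:
--             count += 1
--
--     return count
-- ===== SOURCE B (Python) =====
-- def solution(arr):
--     seen = set()
--     p = 0  # smallest non-negative integer not in seen
--     count = 0
--     for num in arr: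
--         seen.add(num - 1)
--         while p in seen:
--             p += 1
--         if num - 1 < p:
--             count += 1
--     return count
-- ===== Notes on version B (the rewrite author's own statement) =====
-- stated objective: faster
-- what changed: B replaces A's per-element rescan of a bool dict over range(num-1) by a seen-set with an incrementally advanced pointer p = smallest non-negative integer not yet seen, deciding each element by the single comparison num-1 < p.
import Mathlib
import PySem

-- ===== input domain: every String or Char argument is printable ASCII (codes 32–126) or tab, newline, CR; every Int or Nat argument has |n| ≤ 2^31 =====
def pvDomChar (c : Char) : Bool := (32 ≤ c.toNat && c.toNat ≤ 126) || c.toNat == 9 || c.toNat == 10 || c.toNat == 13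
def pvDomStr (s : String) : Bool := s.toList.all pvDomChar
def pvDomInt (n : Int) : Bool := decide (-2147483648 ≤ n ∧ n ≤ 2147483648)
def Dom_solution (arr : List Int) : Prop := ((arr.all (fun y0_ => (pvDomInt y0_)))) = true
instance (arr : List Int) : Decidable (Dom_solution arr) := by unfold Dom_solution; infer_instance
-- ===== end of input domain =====

-- B replaces the quadratic prefix rescan by an O(n) seen-set with an incremental mex pointer.

-- ===== PORT A =====
-- inner 'for i in range(num-1): if not d[i]: flag=False; break' — recursion stops at the first
-- false entry exactly as the Python break does; the fuel (num-1).toNat only makes it total.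
def flagLoop (d : PySem.Dict Int Bool) : Nat → Int → Bool
  | 0, _ => true
  | Nat.succ k, i => if d.getD i false then flagLoop d k (i + 1) else false

def solution (arr : List Int) : Int :=
  let d0 : PySem.Dict Int Bool :=
    (PySem.List.pyRange 0 (arr.length : Int) 1).foldl (fun d i => d.insert i false) PySem.Dict.empty
  (arr.foldl (fun (st : PySem.Dict Int Bool × Int) num =>
      let d := st.1.insert (num - 1) true
      let flag := flagLoop d (num - 1).toNat 0
      (d, if flag then st.2 + 1 else st.2)) (d0, 0)).2

-- ===== PORT B =====
-- 'while p in seen: p += 1' — fuel (size of the set) only makes the loop total; see advance lemmas below.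
def advance (fuel : Nat) (s : List Int) (p : Int) : Int :=
  match fuel with
  | 0 => p
  | fuel + 1 => if p ∈ s then advance fuel s (p + 1) else p

def solution_alt (arr : List Int) : Int :=
  (arr.foldl (fun (st : PySem.Set Int × Int × Int) num =>
      let s := PySem.Set.add st.1 (num - 1)
      let p := advance s.length s st.2.1
      (s, p, if num - 1 < p then st.2.2 + 1 else st.2.2)) (PySem.Set.empty, 0, 0)).2.2

-- ===== PRECONDITION & SPEC =====
def Spec_solution (arr : List Int) (out : Int) : Prop := out = solution_alt arr
instance (arr : List Int) (out : Int) : Decidable (Spec_solution arr out) := by unfold Spec_solution; infer_instance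

-- ===== CLAIM (what is proved, stated in full; the proofs are below) =====
def Claim_equal_solution : Prop := ∀ (arr : List Int), Dom_solution arr → Spec_solution arr (solution arr)

-- ===== LEMMAS AND PROOFS =====

theorem flagLoop_eq_all (d : PySem.Dict Int Bool) :
    ∀ (k : Nat) (i : Int), flagLoop d k i
      = (PySem.List.pyRange i (i + k) 1).all (fun j => d.getD j false) := by
  intro k
  induction k with
  | zero => intro i; simp [flagLoop, PySem.List.pyRange_one_eq_nil (le_refl i)]
  | succ k ih =>
    intro i
    rw [PySem.List.pyRange_one_cons (by push_cast; omega : i < i + (k + 1 : Nat))]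
    simp only [List.all_cons, flagLoop]
    by_cases hd : d.getD i false
    · rw [hd, if_pos rfl, ih (i + 1),
        show i + ((k + 1 : Nat) : Int) = i + 1 + (k : Int) by push_cast; omega]
      simp
    · simp [hd]

theorem flagLoop_eq_range (d : PySem.Dict Int Bool) (n : Int) :
    flagLoop d n.toNat 0 = (PySem.List.pyRange 0 n 1).all (fun j => d.getD j false) := by
  rw [flagLoop_eq_all]
  by_cases hn : 0 ≤ n
  · rw [show (0 : Int) + (n.toNat : Int) = n by omega]
  · rw [PySem.List.pyRange_one_eq_nil (by omega : n ≤ 0),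
      PySem.List.pyRange_one_eq_nil (by omega : (0 : Int) + (n.toNat : Int) ≤ 0)]


-- the relation the fold maintains between A's dict and B's (set, pointer)
def InvSP (d : PySem.Dict Int Bool) (s : List Int) (p : Int) : Prop :=
  (∀ i, d.getD i false = decide (i ∈ s)) ∧ 0 ≤ p ∧ (∀ i, 0 ≤ i → i < p → i ∈ s) ∧ p ∉ s ∧ s.Nodup

theorem advance_le (fuel : Nat) (s : List Int) (p : Int) : p ≤ advance fuel s p := by
  induction fuel generalizing p with
  | zero => simp [advance]
  | succ n ih =>
    simp only [advance]
    split
    · exact le_trans (by omega) (ih (p + 1))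
    · exact le_refl p

theorem advance_mem (fuel : Nat) (s : List Int) (p : Int) :
    ∀ i, p ≤ i → i < advance fuel s p → i ∈ s := by
  induction fuel generalizing p with
  | zero => intro i h1 h2; simp [advance] at h2; omega
  | succ n ih =>
    intro i h1 h2
    simp only [advance] at h2
    by_cases hp : p ∈ s
    · simp [hp] at h2
      rcases eq_or_lt_of_le h1 with h | h
      · exact h ▸ hp
      · exact ih (p + 1) i (by omega) h2
    · simp [hp] at h2; omega

theorem advance_not_mem (fuel : Nat) (s : List Int) (p : Int)
    (hn : s.Nodup) (hf : (s.filter (fun x => decide (p ≤ x))).length ≤ fuel) :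
    advance fuel s p ∉ s := by
  induction fuel generalizing p with
  | zero =>
    intro hmem
    simp only [advance] at hmem
    have : p ∈ s.filter (fun x => decide (p ≤ x)) := by
      simp [List.mem_filter, hmem]
    have := List.length_pos_of_mem this
    omega
  | succ n ih =>
    simp only [advance]
    by_cases hp : p ∈ s
    · simp only [hp, if_true]
      apply ih (p + 1)
      -- the filter for p+1 is the filter for p with p removed (Nodup ⇒ count p = 1)
      have hsub : s.filter (fun x => decide (p + 1 ≤ x))
          = (s.filter (fun x => decide (p ≤ x))).filter (fun x => decide (x ≠ p)) := by
        rw [List.filter_filter]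
        apply List.filter_congr
        intro x _
        by_cases hx : x = p <;> simp [hx] <;> omega
      have hpin : p ∈ s.filter (fun x => decide (p ≤ x)) := by
        simp [List.mem_filter, hp]
      have hnodup : (s.filter (fun x => decide (p ≤ x))).Nodup := hn.filter _
      have hsl := List.filter_sublist (l := s.filter (fun x => decide (p ≤ x))) (p := fun x => decide (x ≠ p))
      have hne : (s.filter (fun x => decide (p ≤ x))).filter (fun x => decide (x ≠ p)) ≠ s.filter (fun x => decide (p ≤ x)) := by
        intro heq
        have : p ∈ (s.filter (fun x => decide (p ≤ x))).filter (fun x => decide (x ≠ p)) := by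
          rw [heq]; exact hpin
        simp [List.mem_filter] at this
      have hlt := lt_of_le_of_ne hsl.length_le (fun h => hne (hsl.eq_of_length h))
      rw [hsub]; omega
    · rw [if_neg hp]; exact hp

-- one step of both folds preserves the relation
theorem step_inv (d : PySem.Dict Int Bool) (s : List Int) (p : Int) (num : Int)
    (h : InvSP d s p) :
    InvSP (d.insert (num - 1) true) (PySem.Set.add s (num - 1))
      (advance (PySem.Set.add s (num - 1)).length (PySem.Set.add s (num - 1)) p) := by
  obtain ⟨hd, hp0, hpre, hpn, hnd⟩ := h
  set s' := PySem.Set.add s (num - 1) with hs'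
  have hmem' : ∀ i, i ∈ s' ↔ i ∈ s ∨ i = num - 1 := fun i => PySem.Set.mem_add s (num - 1) i
  have hnd' : s'.Nodup := PySem.Set.nodup_add s (num - 1) hnd
  set p' := advance s'.length s' p with hp'
  refine ⟨?_, ?_, ?_, ?_, hnd'⟩
  · intro i
    rw [PySem.Dict.getD_insert]
    by_cases hi : i = num - 1 <;> simp [hi, hmem', hd i]
  · exact le_trans hp0 (advance_le _ _ _)
  · intro i h0 hip'
    by_cases hip : i < p
    · exact (hmem' i).2 (Or.inl (hpre i h0 hip))
    · exact advance_mem _ _ _ i (by omega) hip'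
  · exact advance_not_mem _ _ _ hnd' (List.length_filter_le _ _)

-- the per-element decisions agree under the relation
theorem flag_eq (d : PySem.Dict Int Bool) (s : List Int) (p : Int) (num : Int)
    (h : InvSP d s p) (hmem : num - 1 ∈ s) :
    ((PySem.List.pyRange 0 (num - 1) 1).all (fun i => d.getD i false)) = decide (num - 1 < p) := by
  obtain ⟨hd, hp0, hpre, hpn, _⟩ := h
  by_cases hlt : num - 1 < p
  · simp only [hlt, decide_true]
    rw [List.all_eq_true]
    intro i hi
    rw [PySem.List.mem_pyRange_one] at hi
    rw [hd i, decide_eq_true_eq]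
    exact hpre i hi.1 (by omega)
  · simp only [hlt, decide_false]
    have hne : p ≠ num - 1 := fun he => hpn (he ▸ hmem)
    rw [List.all_eq_false]
    refine ⟨p, ?_, ?_⟩
    · rw [PySem.List.mem_pyRange_one]; omega
    · simp [hd p, hpn]

-- the main fold invariant
theorem fold_eq (arr : List Int) :
    ∀ (d : PySem.Dict Int Bool) (s : List Int) (p c : Int), InvSP d s p →
    (arr.foldl (fun (st : PySem.Dict Int Bool × Int) num =>
        let d := st.1.insert (num - 1) true
        let flag := flagLoop d (num - 1).toNat 0
        (d, if flag then st.2 + 1 else st.2)) (d, c)).2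
    = (arr.foldl (fun (st : PySem.Set Int × Int × Int) num =>
        let s := PySem.Set.add st.1 (num - 1)
        let p := advance s.length s st.2.1
        (s, p, if num - 1 < p then st.2.2 + 1 else st.2.2)) (s, p, c)).2.2 := by
  induction arr with
  | nil => intro d s p c _; rfl
  | cons num rest ih =>
    intro d s p c hinv
    simp only [List.foldl_cons]
    have hinv' := step_inv d s p num hinv
    have hmem : num - 1 ∈ PySem.Set.add s (num - 1) := (PySem.Set.mem_add s (num - 1) (num - 1)).2 (Or.inr rfl)
    have hflag := flag_eq _ _ _ num hinv' hmem
    rw [flagLoop_eq_range, show ((PySem.List.pyRange 0 (num - 1) 1).all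
        (fun i => (d.insert (num - 1) true).getD i false)) = decide (num - 1 <
          advance (PySem.Set.add s (num - 1)).length (PySem.Set.add s (num - 1)) p) from hflag]
    by_cases hc : num - 1 < advance (PySem.Set.add s (num - 1)).length (PySem.Set.add s (num - 1)) p
      <;> simp only [hc, decide_true, decide_false, if_true, if_false]
      <;> exact ih _ _ _ _ hinv'

-- A's initial dict answers false everywhere
theorem init_getD (l : List Int) :
    ∀ (d : PySem.Dict Int Bool), (∀ i, d.getD i false = false) →
    ∀ i, (l.foldl (fun d i => d.insert i false) d).getD i false = false := by
  induction l with
  | nil => intro d h i; exact h i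
  | cons x rest ih =>
    intro d h i
    apply ih
    intro j
    rw [PySem.Dict.getD_insert]
    by_cases hj : j = x <;> simp [hj, h j]

-- ===== VERDICT (by name: the statement is the Claim_ definition above) =====
theorem solution_spec : Claim_equal_solution := by
  intro arr _
  unfold Spec_solution solution solution_alt
  apply fold_eq
  refine ⟨?_, le_refl 0, ?_, ?_, List.nodup_nil⟩
  · intro i
    rw [init_getD _ PySem.Dict.empty (fun i => by simp [PySem.Dict.getD_empty]) i]
    simp
  · intro i h0 hi; omega
  · simp [PySem.Set.empty]
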